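-- pv_equiv track=rewrite | github.com/Aasthaengg/IBMdataset | Python_codes/p02709/s990060013.py | solve
-- ===== SOURCE A (Python) =====
-- def solve(n, aaa):
--     dp = [0]
--     aaa_with_idx = list(zip(aaa, range(n)))
--     aaa_with_idx.sort(reverse=True)
--     for k in range(1, n + 1):
--         ndp = [0] * (k + 1)
--         a, i = aaa_with_idx[k - 1]
--         for l in range(k):
--             # 左に配置
--             ndp[l + 1] = max(ndp[l + 1], dp[l] + a * abs(i - l))
--             # 右に配置
--             r = n - (k - l)
--             ndp[l] = max(ndp[l], dp[l] + a * abs(i - r))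
--         dp = ndp
--     return max(dp)
-- ===== SOURCE B (Python) =====
-- def solve(n, aaa):
--     # Top-down memoized recursion over (items placed, items placed at the left end).
--     items = sorted(zip(aaa, range(n)), reverse=True)
--     memo = {}
--
--     def best(k, l):
--         # best total value after placing the k largest items, l of them at the left end
--         if k == 0:
--             return 0
--         key = (k, l)
--         if key in memo:
--             return memo[key]
--         a, i = items[k - 1]
--         v = 0
--         if l > 0:
--             c = best(k - 1, l - 1) + a * abs(i - (l - 1))
--             if c > v:
--                 v = c
--         if l < k:
--             c = best(k - 1, l) + a * abs(i - (n - k + l))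
--             if c > v:
--                 v = c
--         memo[key] = v
--         return v
--
--     ans = 0
--     for l in range(n + 1):
--         ans = max(ans, best(n, l))
--     return ans
-- ===== Notes on version B (the rewrite author's own statement) =====
-- stated objective: alternative
-- what changed: A's bottom-up DP with a rolling 1D array rebuilt each round is replaced by a top-down memoized recursion best(k, l) over the same descending-sorted items, with the answer taken as a running max of best(n, l) over l.
import Mathlib
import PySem

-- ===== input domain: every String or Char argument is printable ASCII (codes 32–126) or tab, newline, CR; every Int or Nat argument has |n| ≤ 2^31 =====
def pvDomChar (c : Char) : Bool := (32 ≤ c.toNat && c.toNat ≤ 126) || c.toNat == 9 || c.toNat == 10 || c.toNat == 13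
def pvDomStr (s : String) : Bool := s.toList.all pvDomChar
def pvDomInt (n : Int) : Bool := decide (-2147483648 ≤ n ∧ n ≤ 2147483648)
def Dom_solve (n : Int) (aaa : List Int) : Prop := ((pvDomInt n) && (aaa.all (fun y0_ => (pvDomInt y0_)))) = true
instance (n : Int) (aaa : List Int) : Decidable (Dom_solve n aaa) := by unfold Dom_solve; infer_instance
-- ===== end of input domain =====

-- B replaces A's bottom-up rolling-array DP by a top-down memoized recursion best(k,l) over the
-- same sorted items (objective: alternative decomposition, same O(n^2) cost).

-- B replaces A's bottom-up rolling-array DP with a top-down memoized recursion best(k, l)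
-- over the same sorted items (objective: alternative decomposition, same O(n^2) cost).

-- ===== PORT A =====
-- inner loop 'for l in range(k)' over ndp = [0]*(k+1); the Python list writes/reads are always
-- in range (l+1 ≤ k < len ndp, l < len dp), so List.set / List.getD at Nat indices are exact here.
def stepA (n a i : Int) (k : Nat) (dp : List Int) : List Int :=
  (List.range k).foldl
    (fun ndp l =>
      let ndp := ndp.set (l + 1) (max (ndp.getD (l + 1) 0) (dp.getD l 0 + a * |i - (l : Int)|))
      ndp.set l (max (ndp.getD l 0) (dp.getD l 0 + a * |i - (n - ((k : Int) - (l : Int)))|)))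
    (List.replicate (k + 1) 0)

-- 'for k in range(1, n+1)' is the fold over List.range n.toNat with k = t+1.
-- awi[k-1] is in range for every such k under Pre_solve (n ≤ len aaa), so getD is exact there;
-- max(dp) never sees an empty list (dp has length k+1 ≥ 1), so .getD 0 after max? is exact.
def solve (n : Int) (aaa : List Int) : Int :=
  let awi := PySem.List.sorted2 (aaa.zip (PySem.List.pyRange 0 n 1)) (fun p => p.1) (fun p => p.2) true
  let dp := (List.range n.toNat).foldl
    (fun dp t => stepA n (awi.getD t (0, 0)).1 (awi.getD t (0, 0)).2 (t + 1) dp) [0]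
  (PySem.List.max? dp (fun y => y)).getD 0

-- ===== PORT B =====
-- best(k, l) with the memo dict threaded through; items[k-1] is in range under Pre_solve.
def bestB (n : Int) (items : List (Int × Int)) :
    Nat → Int → PySem.Dict (Int × Int) Int → Int × PySem.Dict (Int × Int) Int
  | 0, _, memo => (0, memo)
  | (k + 1), l, memo =>
    match memo.get? ((k : Int) + 1, l) with
    | some v => (v, memo)
    | none =>
      let ai := items.getD k (0, 0)
      let p1 : Int × PySem.Dict (Int × Int) Int :=
        if 0 < l then
          let q := bestB n items k (l - 1) memo
          let c := q.1 + ai.1 * |ai.2 - (l - 1)|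
          (if c > 0 then c else 0, q.2)
        else (0, memo)
      let p2 : Int × PySem.Dict (Int × Int) Int :=
        if l < (k : Int) + 1 then
          let q := bestB n items k l p1.2
          let c := q.1 + ai.1 * |ai.2 - (n - ((k : Int) + 1) + l)|
          (if c > p1.1 then c else p1.1, q.2)
        else p1
      (p2.1, p2.2.insert ((k : Int) + 1, l) p2.1)

-- best(n, l) is only called with n ≥ 0 (the 'for l in range(n+1)' loop is empty otherwise),
-- so the Nat argument n.toNat is exact.
def solve_alt (n : Int) (aaa : List Int) : Int :=
  let items := PySem.List.sorted2 (aaa.zip (PySem.List.pyRange 0 n 1)) (fun p => p.1) (fun p => p.2) true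
  (((PySem.List.pyRange 0 (n + 1) 1).foldl
      (fun (st : Int × PySem.Dict (Int × Int) Int) l =>
        let q := bestB n items n.toNat l st.2
        (max st.1 q.1, q.2))
      (0, PySem.Dict.empty))).1

-- ===== PRECONDITION & SPEC =====
-- Pre_ excludes exactly n > len(aaa): there A raises IndexError (aaa_with_idx[k-1] out of range).
def Pre_solve (n : Int) (aaa : List Int) : Prop := n ≤ (aaa.length : Int)
instance (n : Int) (aaa : List Int) : Decidable (Pre_solve n aaa) := by unfold Pre_solve; infer_instance
def pvWitness_solve : Int × List Int := (3, [1, -2, 3])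

def Spec_solve (n : Int) (aaa : List Int) (out : Int) : Prop := out = solve_alt n aaa
instance (n : Int) (aaa : List Int) (out : Int) : Decidable (Spec_solve n aaa out) := by unfold Spec_solve; infer_instance

-- ===== CLAIM (what is proved, stated in full; the proofs are below) =====
def Claim_equal_solve : Prop := ∀ (n : Int) (aaa : List Int), Dom_solve n aaa → Pre_solve n aaa → Spec_solve n aaa (solve n aaa)

-- ===== LEMMAS AND PROOFS =====

-- the common value function: F n items k l = best total after placing the k largest items, l of them at the left end
def F (n : Int) (items : List (Int × Int)) : Nat → Int → Int
  | 0, _ => 0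
  | (k + 1), l =>
    let a := (items.getD k (0, 0)).1
    let i := (items.getD k (0, 0)).2
    let v1 : Int := if 0 < l then max 0 (F n items k (l - 1) + a * |i - (l - 1)|) else 0
    if l < (k : Int) + 1 then max v1 (F n items k l + a * |i - (n - ((k : Int) + 1) + l)|) else v1

lemma mapRange_getD (f : Nat → Int) (N j : Nat) :
    ((List.range N).map f).getD j 0 = if j < N then f j else 0 := by
  by_cases h : j < N
  · rw [List.getD_eq_getElem _ _ (by simpa using h)]
    simp [h]
  · rw [List.getD_eq_default _ _ (by simpa using Nat.le_of_not_lt h)]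
    simp [h]

lemma mapRange_set (f : Nat → Int) (N i : Nat) (v : Int) :
    ((List.range N).map f).set i v = (List.range N).map (fun j => if j = i then v else f j) := by
  apply List.ext_getElem
  · simp
  · intro j h1 h2
    simp only [List.getElem_set, List.getElem_map, List.getElem_range] at *
    by_cases h : i = j <;> simp [h, Ne.symm]

-- the inner-loop invariant: value of cell j of ndp after m iterations of A's inner loop
def gA (n a i : Int) (dp : List Int) (K m j : Nat) : Int :=
  if j < m then
    max (if 0 < j then max 0 (dp.getD (j - 1) 0 + a * |i - ((j : Int) - 1)|) else 0)
        (dp.getD j 0 + a * |i - (n - ((K : Int) - (j : Int)))|)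
  else if j = m ∧ 0 < m then max 0 (dp.getD (m - 1) 0 + a * |i - ((m : Int) - 1)|)
  else 0

lemma innerA_inv (n a i : Int) (dp : List Int) (K : Nat) :
    ∀ m, m ≤ K →
    (List.range m).foldl
      (fun ndp l =>
        let ndp := ndp.set (l + 1) (max (ndp.getD (l + 1) 0) (dp.getD l 0 + a * |i - (l : Int)|))
        ndp.set l (max (ndp.getD l 0) (dp.getD l 0 + a * |i - (n - ((K : Int) - (l : Int)))|)))
      (List.replicate (K + 1) 0)
    = (List.range (K + 1)).map (gA n a i dp K m) := by
  intro m hm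
  induction m with
  | zero =>
    simp only [List.range_zero, List.foldl_nil]
    apply List.ext_getElem
    · simp
    · intro j h1 h2
      simp [gA]
  | succ m ih =>
    rw [List.range_succ, List.foldl_append, ih (by omega), List.foldl_cons, List.foldl_nil]
    dsimp only
    have hg1 : ((List.range (K + 1)).map (gA n a i dp K m)).getD (m + 1) 0 = 0 := by
      rw [mapRange_getD]
      simp only [gA]
      have h1 : ¬ (m + 1 < m) := by omega
      have h2 : ¬ (m + 1 = m ∧ 0 < m) := by omega
      simp [h1, h2]
    rw [hg1, mapRange_set]
    have hg2 : ((List.range (K + 1)).map (fun j => if j = m + 1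
          then max 0 (dp.getD m 0 + a * |i - (m : Int)|) else gA n a i dp K m j)).getD m 0
        = (if 0 < m then max 0 (dp.getD (m - 1) 0 + a * |i - ((m : Int) - 1)|) else 0) := by
      rw [mapRange_getD]
      have h1 : m < K + 1 := by omega
      have h2 : ¬ (m = m + 1) := by omega
      have h3 : ¬ (m < m) := by omega
      simp only [h1, if_true, h2, if_false, gA, h3]
      by_cases h4 : 0 < m <;> simp [h4]
    rw [hg2, mapRange_set]
    apply List.map_congr_left
    intro j hj
    rw [List.mem_range] at hj
    by_cases e1 : j = m
    · subst e1
      have h2 : j < j + 1 := by omega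
      simp [gA, h2]
    · by_cases e2 : j = m + 1
      · subst e2
        have h1 : ¬ (m + 1 < m + 1) := by omega
        have h2 : (m + 1 = m + 1 ∧ 0 < m + 1) := by omega
        simp only [if_neg e1, if_pos rfl, gA, if_neg h1, if_pos h2]
        have c1 : (m + 1 : Nat) - 1 = m := by omega
        have c2 : ((m + 1 : Nat) : Int) - 1 = (m : Int) := by push_cast; ring
        rw [c1, c2]
        simp
      · simp only [if_neg e1, if_neg e2, gA]
        by_cases h1 : j < m
        · have h2 : j < m + 1 := by omega
          simp [h1, h2]
        · have h2 : ¬ (j < m + 1) := by omega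
          have h3 : ¬ (j = m ∧ 0 < m) := by simp [e1]
          have h4 : ¬ (j = m + 1 ∧ 0 < m + 1) := by simp [e2]
          simp [h1, h2, e1, e2]

lemma stepA_eq (n : Int) (items : List (Int × Int)) (t : Nat) :
    stepA n (items.getD t (0, 0)).1 (items.getD t (0, 0)).2 (t + 1)
        ((List.range (t + 1)).map (fun l : Nat => F n items t (l : Int)))
    = (List.range (t + 1 + 1)).map (fun l : Nat => F n items (t + 1) (l : Int)) := by
  unfold stepA
  rw [innerA_inv n (items.getD t (0, 0)).1 (items.getD t (0, 0)).2
      ((List.range (t + 1)).map (fun l : Nat => F n items t (l : Int))) (t + 1) (t + 1) le_rfl]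
  apply List.map_congr_left
  intro j hj
  rw [List.mem_range] at hj
  by_cases h : j < t + 1
  · have hc : ((j : Int)) < (t : Int) + 1 := by exact_mod_cast h
    have harg : (n - (((t + 1 : Nat) : Int) - (j : Int))) = n - ((t : Int) + 1) + (j : Int) := by
      push_cast; ring
    by_cases h0 : 0 < j
    · have h0' : (0 : Int) < (j : Int) := by exact_mod_cast h0
      have hjm : j - 1 < t + 1 := by omega
      have hcast : ((j - 1 : Nat) : Int) = (j : Int) - 1 := by omega
      simp only [gA, F, mapRange_getD, harg, hcast]
      simp [h, hc, h0, h0', hjm]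
    · have h0' : ¬ ((0 : Int) < (j : Int)) := by exact_mod_cast h0
      simp only [gA, F, mapRange_getD, harg]
      simp [h, hc, h0, h0']
  · have he : j = t + 1 := by omega
    subst he
    have hc : ¬ (((t + 1 : Nat) : Int) < (t : Int) + 1) := by push_cast; omega
    have h2 : (t + 1 = t + 1 ∧ 0 < t + 1) := by omega
    have h0' : (0 : Int) < ((t + 1 : Nat) : Int) := by push_cast; omega
    simp only [gA, if_neg h, if_pos h2, F, if_neg hc, if_pos h0']
    have c1 : (t + 1 : Nat) - 1 = t := by omega
    have c2 : ((t + 1 : Nat) : Int) - 1 = (t : Int) := by push_cast; ring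
    rw [c1, c2, mapRange_getD]
    simp

lemma dpA_eq (n : Int) (items : List (Int × Int)) (T : Nat) :
    (List.range T).foldl
      (fun dp t => stepA n (items.getD t (0, 0)).1 (items.getD t (0, 0)).2 (t + 1) dp) [0]
    = (List.range (T + 1)).map (fun l : Nat => F n items T (l : Int)) := by
  induction T with
  | zero => simp [F]
  | succ T ih =>
    rw [List.range_succ, List.foldl_append, ih, List.foldl_cons, List.foldl_nil]
    exact stepA_eq n items T

lemma if_gt_max (v c : Int) : (if c > v then c else v) = max v c := by
  split_ifs with h
  · exact (max_eq_right h.le).symm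
  · exact (max_eq_left (not_lt.mp h)).symm

-- memo soundness: every value stored in the memo dict is the corresponding value of F
def GoodM (n : Int) (items : List (Int × Int)) (memo : PySem.Dict (Int × Int) Int) : Prop :=
  ∀ (kk l v : Int), memo.get? (kk, l) = some v → v = F n items kk.toNat l

lemma bestB_correct (n : Int) (items : List (Int × Int)) :
    ∀ (k : Nat) (l : Int) (memo : PySem.Dict (Int × Int) Int), GoodM n items memo →
      (bestB n items k l memo).1 = F n items k l ∧ GoodM n items (bestB n items k l memo).2 := by
  intro k
  induction k with
  | zero => intro l memo hg; exact ⟨by simp [bestB, F], hg⟩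
  | succ k ih =>
    intro l memo hg
    cases hmem : memo.get? ((k : Int) + 1, l) with
    | some v =>
      have hv := hg ((k : Int) + 1) l v hmem
      have ht : ((k : Int) + 1).toNat = k + 1 := by omega
      rw [ht] at hv
      constructor
      · simp only [bestB, hmem]
        exact hv
      · simp only [bestB, hmem]
        exact hg
    | none =>
      have hval : (bestB n items (k + 1) l memo).1 = F n items (k + 1) l ∧
          GoodM n items (bestB n items (k + 1) l memo).2 := by
        by_cases hl : 0 < l <;> by_cases hr : l < (k : Int) + 1
        · obtain ⟨e1, g1⟩ := ih (l - 1) memo hg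
          obtain ⟨e2, g2⟩ := ih l (bestB n items k (l - 1) memo).2 g1
          simp only [bestB, hmem, if_pos hl, if_pos hr]
          rw [e1, e2, if_gt_max, if_gt_max]
          constructor
          · simp only [F, if_pos hl, if_pos hr]
          · intro kk l' v hv
            rw [PySem.Dict.get?_insert] at hv
            split_ifs at hv with hkey
            · obtain ⟨hk1, hl1⟩ := Prod.mk.injEq .. ▸ hkey
              subst hl1
              injection hv with hveq
              have ht : kk.toNat = k + 1 := by rw [hk1]; omega
              rw [← hveq, ht]
              simp only [F, if_pos hl, if_pos hr]
            · exact g2 _ _ _ hv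
        · obtain ⟨e1, g1⟩ := ih (l - 1) memo hg
          simp only [bestB, hmem, if_pos hl, if_neg hr]
          rw [e1, if_gt_max]
          constructor
          · simp only [F, if_pos hl, if_neg hr]
          · intro kk l' v hv
            rw [PySem.Dict.get?_insert] at hv
            split_ifs at hv with hkey
            · obtain ⟨hk1, hl1⟩ := Prod.mk.injEq .. ▸ hkey
              subst hl1
              injection hv with hveq
              have ht : kk.toNat = k + 1 := by rw [hk1]; omega
              rw [← hveq, ht]
              simp only [F, if_pos hl, if_neg hr]
            · exact g1 _ _ _ hv
        · obtain ⟨e2, g2⟩ := ih l memo hg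
          simp only [bestB, hmem, if_neg hl, if_pos hr]
          rw [e2, if_gt_max]
          constructor
          · simp only [F, if_neg hl, if_pos hr]
          · intro kk l' v hv
            rw [PySem.Dict.get?_insert] at hv
            split_ifs at hv with hkey
            · obtain ⟨hk1, hl1⟩ := Prod.mk.injEq .. ▸ hkey
              subst hl1
              injection hv with hveq
              have ht : kk.toNat = k + 1 := by rw [hk1]; omega
              rw [← hveq, ht]
              simp only [F, if_neg hl, if_pos hr]
            · exact g2 _ _ _ hv
        · simp only [bestB, hmem, if_neg hl, if_neg hr]
          constructor
          · simp only [F, if_neg hl, if_neg hr]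
          · intro kk l' v hv
            rw [PySem.Dict.get?_insert] at hv
            split_ifs at hv with hkey
            · obtain ⟨hk1, hl1⟩ := Prod.mk.injEq .. ▸ hkey
              subst hl1
              injection hv with hveq
              have ht : kk.toNat = k + 1 := by rw [hk1]; omega
              rw [← hveq, ht]
              simp only [F, if_neg hl, if_neg hr]
            · exact hg _ _ _ hv
      exact hval

lemma F_zero_nonneg (n : Int) (items : List (Int × Int)) (k : Nat) : 0 ≤ F n items k 0 := by
  cases k with
  | zero => simp [F]
  | succ k =>
    have h : ((0 : Int) < (k : Int) + 1) := by positivity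
    simp [F, h]

lemma foldB_eq (n : Int) (items : List (Int × Int)) (N : Nat) :
    ∀ (ls : List Int) (acc : Int) (memo : PySem.Dict (Int × Int) Int), GoodM n items memo →
      (ls.foldl
        (fun (st : Int × PySem.Dict (Int × Int) Int) l =>
          let q := bestB n items N l st.2
          (max st.1 q.1, q.2))
        (acc, memo)).1
      = ls.foldl (fun a l => max a (F n items N l)) acc := by
  intro ls
  induction ls with
  | nil => intro acc memo _; rfl
  | cons x t ih =>
    intro acc memo hg
    obtain ⟨e, g⟩ := bestB_correct n items N x memo hg
    simp only [List.foldl_cons]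
    rw [ih (max acc (bestB n items N x memo).1) (bestB n items N x memo).2 g, e]

-- ===== VERDICT (by name: the statement is the Claim_ definition above) =====
theorem solve_spec : Claim_equal_solve := by
  intro n aaa _ _
  unfold Spec_solve

  simp only [solve, solve_alt]
  rw [dpA_eq]
  have hgood : GoodM n (PySem.List.sorted2 (aaa.zip (PySem.List.pyRange 0 n 1)) (fun p => p.1) (fun p => p.2) true) PySem.Dict.empty := by
    intro kk l v hv
    simp [PySem.Dict.get?_empty] at hv
  rw [foldB_eq _ _ _ _ _ _ hgood]
  set items := PySem.List.sorted2 (aaa.zip (PySem.List.pyRange 0 n 1)) (fun p => p.1) (fun p => p.2) true with hitems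
  by_cases hn : 0 ≤ n
  · have hr : PySem.List.pyRange 0 (n + 1) 1 = (List.range (n.toNat + 1)).map (fun k : Nat => ((0 : Int) + (k : Int))) := by
      have hc : (n + 1 - 0).toNat = n.toNat + 1 := by omega
      rw [PySem.List.pyRange_one, hc]
    rw [hr, List.foldl_map]
    simp only [zero_add]
    rw [List.range_succ_eq_map, List.map_cons, PySem.List.max?_id_cons]
    simp only [Option.getD_some]
    rw [List.foldl_cons]
    simp only [Nat.cast_zero]
    rw [max_eq_right (F_zero_nonneg n items n.toNat), List.foldl_map]
  · have h0 : n.toNat = 0 := by omega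
    have hnil : PySem.List.pyRange 0 (n + 1) 1 = [] := PySem.List.pyRange_one_eq_nil (by omega)
    rw [h0, hnil]
    simp [F, PySem.List.max?]
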